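-- pv_equiv track=rewrite | github.com/Nkassymkhan/PP2 | Lab1/G.py | fbtd
-- ===== SOURCE A (Python) =====
-- def fbtd (n, e = 1):
--     if int(n) == 0:
--         return 0
--     else:
--         s = int(n) % 10
--         n = int(n // 10)
--         s = s * e
--         return s + fbtd(int(n), e * 2)
-- ===== SOURCE B (Python) =====
-- def fbtd(n, e=1):
--     # Iterative rewrite: explicit while-loop with an accumulator instead of
--     # tail recursion; same values, same divergence on negative n.
--     n = int(n)
--     total = 0
--     while n != 0:
--         total += (n % 10) * e
--         n //= 10
--         e *= 2
--     return total
-- ===== Notes on version B (the rewrite author's own statement) =====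
-- stated objective: simpler
-- what changed: Replaces the tail recursion with an explicit while-loop accumulating the weighted digit sum in a local total.
-- outside the precondition, e.g. on fbtd(-5, 1): A raises RecursionError, B does not finish within the time limit
import Mathlib
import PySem

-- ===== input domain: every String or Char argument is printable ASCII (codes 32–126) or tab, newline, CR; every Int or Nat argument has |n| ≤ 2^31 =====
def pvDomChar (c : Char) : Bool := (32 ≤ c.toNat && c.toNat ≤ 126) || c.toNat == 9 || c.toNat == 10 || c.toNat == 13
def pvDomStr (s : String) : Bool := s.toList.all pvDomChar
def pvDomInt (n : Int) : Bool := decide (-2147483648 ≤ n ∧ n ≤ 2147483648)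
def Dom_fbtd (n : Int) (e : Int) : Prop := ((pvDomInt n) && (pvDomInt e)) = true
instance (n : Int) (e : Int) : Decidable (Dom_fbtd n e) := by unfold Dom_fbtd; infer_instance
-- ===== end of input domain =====

-- B replaces A's tail recursion by an explicit while-loop with an accumulator (objective: simpler).
-- Pre_ excludes negative n, on which the Python A raises RecursionError (and B loops forever).


-- ===== PORT A =====
-- Fuel-based transcription of A's recursion; fuel n.toNat + 1 is enough for every n ≥ 0
-- (n // 10 strictly decreases); outside Pre_ (n < 0) the Python raises and nothing is claimed.
def fbtdGo : Nat → Int → Int → Int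
  | 0, _, _ => 0
  | f + 1, n, e =>
    if n = 0 then 0
    else
      let s := PySem.Int.mod n 10
      let n' := PySem.Int.floordiv n 10
      let s' := s * e
      s' + fbtdGo f n' (e * 2)

def fbtd (n : Int) (e : Int) : Int := fbtdGo (n.toNat + 1) n e

-- ===== PORT B =====
-- Transcription of B's while-loop: one fuel unit per iteration, accumulator `total`.
def fbtdLoop : Nat → Int → Int → Int → Int
  | 0, _, _, total => total
  | f + 1, n, e, total =>
    if n ≠ 0 then
      fbtdLoop f (PySem.Int.floordiv n 10) (e * 2) (total + PySem.Int.mod n 10 * e)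
    else total

def fbtd_alt (n : Int) (e : Int) : Int := fbtdLoop (n.toNat + 1) n e 0

-- ===== PRECONDITION & SPEC =====
-- Pre_ excludes n < 0: there A's recursion never reaches 0 and raises RecursionError (B diverges).
def Pre_fbtd (n : Int) (e : Int) : Prop := 0 ≤ n
instance (n : Int) (e : Int) : Decidable (Pre_fbtd n e) := by unfold Pre_fbtd; infer_instance
def pvWitness_fbtd : Int × Int := (1234, 1)

def Spec_fbtd (n : Int) (e : Int) (out : Int) : Prop := out = fbtd_alt n e
instance (n : Int) (e : Int) (out : Int) : Decidable (Spec_fbtd n e out) := by unfold Spec_fbtd; infer_instance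

-- ===== CLAIM (what is proved, stated in full; the proofs are below) =====
def Claim_equal_fbtd : Prop := ∀ (n : Int) (e : Int), Dom_fbtd n e → Pre_fbtd n e → Spec_fbtd n e (fbtd n e)

-- ===== LEMMAS AND PROOFS =====

-- Loop invariant: with the same fuel, B's loop computes total + A's recursion value.
theorem fbtdLoop_eq (f : Nat) : ∀ (n e total : Int),
    fbtdLoop f n e total = total + fbtdGo f n e := by
  induction f with
  | zero => intro n e total; simp [fbtdLoop, fbtdGo]
  | succ f ih =>
    intro n e total
    by_cases h : n = 0
    · simp [fbtdLoop, fbtdGo, h]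
    · simp only [fbtdLoop, fbtdGo, h, if_neg, if_pos, ne_eq, not_false_eq_true, ite_true,
        ite_false]
      rw [ih]
      ring

-- ===== VERDICT (by name: the statement is the Claim_ definition above) =====
theorem fbtd_spec : Claim_equal_fbtd := by
  intro n e _ _
  unfold Spec_fbtd fbtd fbtd_alt
  rw [fbtdLoop_eq]
  ring
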